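-- pv_equiv track=rewrite | github.com/quoterbox/somevar-ui-playground | src/somevar_ui_playground/ui/playground_support.py | _leading_spaces_width
-- ===== SOURCE A (Python) =====
-- def _leading_spaces_width(text: str) -> int:
--     width = 0
--     for ch in text:
--         if ch == ' ':
--             width += 1
--         elif ch == '\t':
--             width += 4
--         else:
--             break
--     return width
-- ===== SOURCE B (Python) =====
-- def _leading_spaces_width(text: str) -> int:
--     prefix = text[:len(text) - len(text.lstrip(' \t'))]
--     return prefix.count(' ') + 4 * prefix.count('\t')
-- ===== Notes on version B (the rewrite author's own statement) =====
-- stated objective: simpler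
-- what changed: Replaces the single accumulating loop-with-break by a two-phase decomposition: first isolate the leading run of spaces/tabs via an lstrip boundary slice, then sum two independent count passes over that prefix.
import Mathlib
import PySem

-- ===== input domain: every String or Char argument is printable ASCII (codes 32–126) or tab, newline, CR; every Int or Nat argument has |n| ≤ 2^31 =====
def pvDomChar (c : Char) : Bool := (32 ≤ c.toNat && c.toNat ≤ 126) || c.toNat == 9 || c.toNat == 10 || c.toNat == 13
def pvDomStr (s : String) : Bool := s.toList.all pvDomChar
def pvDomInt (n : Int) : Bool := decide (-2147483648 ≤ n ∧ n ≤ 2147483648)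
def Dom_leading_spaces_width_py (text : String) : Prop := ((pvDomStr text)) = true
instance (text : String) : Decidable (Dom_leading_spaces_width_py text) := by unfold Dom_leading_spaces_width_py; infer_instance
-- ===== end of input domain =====

-- B computes the same width by finding the whitespace prefix first (lstrip boundary) and then counting ' ' and '\t' in it — a different decomposition, same cost.


-- ===== PORT A =====
-- A's for-loop with accumulator `width` and early break, as structural recursion over the chars
def pvGoA : Int → List Char → Int
  | width, [] => width
  | width, c :: cs =>
    if c = ' ' then pvGoA (width + 1) cs
    else if c = '\t' then pvGoA (width + 4) cs
    else width

def leading_spaces_width_py (text : String) : Int := pvGoA 0 text.toList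

-- ===== PORT B =====
-- Source B: prefix = text[:len(text) - len(text.lstrip(' \t'))]; lstrip(' \t') is ported by hand
-- as dropWhile over ' '/'\t' (exact: Python's lstrip(chars) drops exactly the leading run of those chars).
def leading_spaces_width_py_alt (text : String) : Int :=
  let stripped := text.toList.dropWhile (fun c => c == ' ' || c == '\t')
  let pref := text.toList.take (text.toList.length - stripped.length)
  (pref.count ' ' : Int) + 4 * (pref.count '\t' : Int)

-- ===== PRECONDITION & SPEC =====
def Spec_leading_spaces_width_py (text : String) (out : Int) : Prop := out = leading_spaces_width_py_alt text
instance (text : String) (out : Int) : Decidable (Spec_leading_spaces_width_py text out) := by unfold Spec_leading_spaces_width_py; infer_instance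

-- ===== CLAIM (what is proved, stated in full; the proofs are below) =====
def Claim_equal_leading_spaces_width_py : Prop := ∀ (text : String), Dom_leading_spaces_width_py text → Spec_leading_spaces_width_py text (leading_spaces_width_py text)

-- ===== LEMMAS AND PROOFS =====

-- the take in B is exactly the takeWhile prefix
theorem pv_take_eq_takeWhile (l : List Char) (p : Char → Bool) :
    l.take (l.length - (l.dropWhile p).length) = l.takeWhile p := by
  have hlen : l.length - (l.dropWhile p).length = (l.takeWhile p).length := by
    have h := congrArg List.length (List.takeWhile_append_dropWhile (p := p) (l := l))
    rw [List.length_append] at h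
    omega
  rw [hlen]
  exact ((List.prefix_iff_eq_take).mp (List.takeWhile_prefix p)).symm

-- A's loop equals `width +` the two counts over the takeWhile prefix
theorem pv_goA_eq (l : List Char) (width : Int) :
    pvGoA width l =
      width + ((l.takeWhile (fun c => c == ' ' || c == '\t')).count ' ' : Int)
            + 4 * ((l.takeWhile (fun c => c == ' ' || c == '\t')).count '\t' : Int) := by
  induction l generalizing width with
  | nil => simp [pvGoA]
  | cons c cs ih =>
    by_cases hs : c = ' '
    · subst hs
      simp [pvGoA, List.takeWhile_cons, List.count_cons, ih]
      push_cast
      ring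
    · by_cases ht : c = '\t'
      · subst ht
        simp [pvGoA, List.takeWhile_cons, List.count_cons, ih]
        push_cast
        ring
      · simp [pvGoA, hs, ht, List.takeWhile_cons]

-- ===== VERDICT (by name: the statement is the Claim_ definition above) =====
theorem leading_spaces_width_py_spec : Claim_equal_leading_spaces_width_py := by
  intro text _
  unfold Spec_leading_spaces_width_py leading_spaces_width_py leading_spaces_width_py_alt
  simp only [pv_goA_eq, pv_take_eq_takeWhile]
  ring
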